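-- pv_equiv track=rewrite | github.com/dperez96/projet_gabi | time_service.py | next_point
-- ===== SOURCE A (Python) =====
-- def next_point(t, start):
--     # takes as argument a cropped t vector, and an integer. if the integer is not in t,
--     # the function returns the smallest number in t larger than the integer
--     st = start
--     b = 1
--     while b and st < t[-1]:
--         st += 1
--         if st in t:
--             b = 0
--     return st
-- ===== SOURCE B (Python) =====
-- def next_point(t, start):
--     last = t[-1]
--     if start >= last:
--         return start
--     return min(x for x in t if x > start)
-- ===== Notes on version B (the rewrite author's own statement) =====
-- stated objective: alternative
-- what changed: Replaces the step-by-step integer counting loop with repeated 'in t' membership scans by a single filtered min over t (after the same t[-1] cap check); it trades A's gap-dependent scanning for one fixed pass.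
import Mathlib
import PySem

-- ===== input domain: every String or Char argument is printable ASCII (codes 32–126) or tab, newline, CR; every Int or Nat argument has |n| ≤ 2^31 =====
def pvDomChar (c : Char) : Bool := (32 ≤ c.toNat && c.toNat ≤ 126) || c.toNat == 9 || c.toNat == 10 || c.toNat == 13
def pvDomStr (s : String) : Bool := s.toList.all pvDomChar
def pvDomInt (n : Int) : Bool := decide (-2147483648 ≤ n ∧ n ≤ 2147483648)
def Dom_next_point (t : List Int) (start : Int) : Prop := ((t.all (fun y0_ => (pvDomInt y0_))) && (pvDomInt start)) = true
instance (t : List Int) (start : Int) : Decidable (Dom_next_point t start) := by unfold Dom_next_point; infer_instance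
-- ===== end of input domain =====

-- B computes the capped successor by a single filtered min over t instead of A's step-by-step counting loop with per-step membership scans (alternative one-pass formulation).


-- ===== PORT A =====
-- A's while loop: step st upward while st < t[-1], stop as soon as st ∈ t
def nextPointLoop (t : List Int) (last : Int) (st : Int) : Int :=
  if h : st < last then
    let st' := st + 1
    if st' ∈ t then st' else nextPointLoop t last st'
  else st
termination_by (last - st).toNat
decreasing_by omega

def next_point (t : List Int) (start : Int) : Int :=
  match PySem.List.pyGet? t (-1) with
  | none => 0          -- t = []: Python raises IndexError; excluded by Pre_
  | some last => nextPointLoop t last start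

-- ===== PORT B =====
def next_point_alt (t : List Int) (start : Int) : Int :=
  match PySem.List.pyGet? t (-1) with
  | none => 0          -- t = []: excluded by Pre_
  | some last =>
    if start ≥ last then start
    else (PySem.List.min? (t.filter (fun x => start < x)) (fun x => x)).getD 0

-- ===== PRECONDITION & SPEC =====
-- Pre_ excludes only the empty list, on which A's t[-1] raises IndexError.
def Pre_next_point (t : List Int) (start : Int) : Prop := t ≠ []
instance (t : List Int) (start : Int) : Decidable (Pre_next_point t start) := by unfold Pre_next_point; infer_instance
def pvWitness_next_point : List Int × Int := ([3, 7], 1)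

def Spec_next_point (t : List Int) (start : Int) (out : Int) : Prop := out = next_point_alt t start
instance (t : List Int) (start : Int) (out : Int) : Decidable (Spec_next_point t start out) := by unfold Spec_next_point; infer_instance

-- ===== CLAIM (what is proved, stated in full; the proofs are below) =====
def Claim_equal_next_point : Prop := ∀ (t : List Int) (start : Int), Dom_next_point t start → Pre_next_point t start → Spec_next_point t start (next_point t start)

-- ===== LEMMAS AND PROOFS =====

-- A's loop computes the minimum element of t that exceeds st, provided some element (`last`) does.
lemma nextPointLoop_eq_min (t : List Int) (last : Int) (hl : last ∈ t) :
    ∀ (st : Int), st < last →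
      nextPointLoop t last st
        = (PySem.List.min? (t.filter (fun x => st < x)) (fun x => x)).getD 0 := by
  intro st hst
  generalize hn : (last - st).toNat = n
  induction n generalizing st with
  | zero => omega
  | succ n ih =>
    rw [nextPointLoop, dif_pos hst]
    by_cases hmem : (st + 1) ∈ t
    · rw [if_pos hmem]
      have hfilter : (st + 1) ∈ t.filter (fun x => st < x) := by
        simp [List.mem_filter, hmem]
      rcases h : PySem.List.min? (t.filter (fun x => st < x)) (fun x => x) with _ | m
      · rw [PySem.List.min?_eq_none_iff] at h
        simp [h] at hfilter
      · have hm := PySem.List.min?_mem h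
        have hle := PySem.List.min?_isMin h _ hfilter
        have : st < m := (List.mem_filter.mp hm).2 |> of_decide_eq_true
        simp only [Option.getD_some]
        omega
    · rw [if_neg hmem]
      have hne : last ≠ st + 1 := fun h => hmem (h ▸ hl)
      have hlt : st + 1 < last := by omega
      have hfe : t.filter (fun x => st < x) = t.filter (fun x => st + 1 < x) := by
        apply List.filter_congr
        intro x hx
        have : x ≠ st + 1 := fun h => hmem (h ▸ hx)
        simp only [decide_eq_decide]
        omega
      rw [hfe]
      exact ih (st + 1) hlt (by omega)

-- ===== VERDICT (by name: the statement is the Claim_ definition above) =====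
theorem next_point_spec : Claim_equal_next_point := by
  intro t start _ hpre
  unfold Spec_next_point next_point next_point_alt
  rcases h : PySem.List.pyGet? t (-1) with _ | last
  · rfl
  · have hl : last ∈ t := PySem.List.mem_of_pyGet?_eq_some t h
    dsimp only
    by_cases hge : start ≥ last
    · rw [if_pos hge, nextPointLoop, dif_neg (by omega)]
    · rw [if_neg hge]
      exact nextPointLoop_eq_min t last hl start (by omega)
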